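-- pv_equiv track=rewrite | github.com/aws-samples/sample-data-analyst-bi | code/data-analyst/scripts/query_db/postprocessor.py | escape_sql_string
-- ===== SOURCE A (Python) =====
-- def escape_sql_string(value):
--     """
--     Comprehensively escape a string for safe SQL usage
--     """
--     if not isinstance(value, str):
--         return value
--
--     # List of special characters to escape
--     special_chars = {
--         "'": "''",        # Single quote
--         "\\": "\\\\",     # Backslash
--         "\n": "\\n",      # Newline
--         "\r": "\\r",      # Carriage return
--         "\t": "\\t",      # Tab
--         "\b": "\\b",      # Backspace
--         "\f": "\\f",      # Form feed
--         '"': '""',        # Double quote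
--         "%": "\\%",       # Percent sign (used in LIKE clauses)
--         "_": "\\_",       # Underscore (used in LIKE clauses)
--     }
--
--     # Escape each special character
--     escaped_value = value
--     for char, replacement in special_chars.items():
--         escaped_value = escaped_value.replace(char, replacement)
--
--     return escaped_value
-- ===== SOURCE B (Python) =====
-- _SQL_ESCAPE_TABLE = str.maketrans({
--     "'": "''",
--     "\\": "\\\\",
--     "\n": "\\n",
--     "\r": "\\r",
--     "\t": "\\t",
--     "\b": "\\b",
--     "\f": "\\f",
--     '"': '""',
--     "%": "\\%",
--     "_": "\\_",
-- })
--
--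
-- def escape_sql_string(value):
--     """
--     Comprehensively escape a string for safe SQL usage
--     """
--     if not isinstance(value, str):
--         return value
--     return value.translate(_SQL_ESCAPE_TABLE)
-- ===== Notes on version B (the rewrite author's own statement) =====
-- stated objective: idiomatic
-- what changed: Replaces ten sequential full-string .replace passes (each building a new string) with one translation table built once via str.maketrans and a single left-to-right value.translate pass.
import Mathlib
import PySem

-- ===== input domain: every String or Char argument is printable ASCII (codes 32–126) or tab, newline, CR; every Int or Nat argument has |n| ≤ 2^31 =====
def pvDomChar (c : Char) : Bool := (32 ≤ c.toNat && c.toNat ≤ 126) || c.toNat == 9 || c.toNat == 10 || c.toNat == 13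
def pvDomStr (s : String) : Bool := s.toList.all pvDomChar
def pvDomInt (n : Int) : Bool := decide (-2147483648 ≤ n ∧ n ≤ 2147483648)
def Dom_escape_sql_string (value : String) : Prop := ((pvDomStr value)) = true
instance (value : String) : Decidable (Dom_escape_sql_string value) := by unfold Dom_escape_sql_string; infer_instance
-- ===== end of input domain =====

-- B replaces A's ten sequential full-string replace passes with one per-character
-- translation table applied in a single left-to-right pass (Python str.translate); idiomatic.


-- ===== PORT A =====
-- ten successive replace passes, in the dict's insertion order
def escape_sql_string (value : String) : String :=
  let e := value
  let e := PySem.Str.replace e "'" "''"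
  let e := PySem.Str.replace e "\\" "\\\\"
  let e := PySem.Str.replace e "\n" "\\n"
  let e := PySem.Str.replace e "\r" "\\r"
  let e := PySem.Str.replace e "\t" "\\t"
  let e := PySem.Str.replace e "\x08" "\\b"
  let e := PySem.Str.replace e "\x0c" "\\f"
  let e := PySem.Str.replace e "\"" "\"\""
  let e := PySem.Str.replace e "%" "\\%"
  let e := PySem.Str.replace e "_" "\\_"
  e

-- ===== PORT B =====
-- the translation table built once by str.maketrans in Source B
def sqlEscapeTable (c : Char) : List Char :=
  if c = '\'' then ['\'', '\'']
  else if c = '\\' then ['\\', '\\']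
  else if c = '\n' then ['\\', 'n']
  else if c = '\r' then ['\\', 'r']
  else if c = '\t' then ['\\', 't']
  else if c = '\x08' then ['\\', 'b']
  else if c = '\x0c' then ['\\', 'f']
  else if c = '"' then ['"', '"']
  else if c = '%' then ['\\', '%']
  else if c = '_' then ['\\', '_']
  else [c]

-- value.translate(table): one pass over the characters
def escape_sql_string_alt (value : String) : String :=
  String.ofList (value.toList.flatMap sqlEscapeTable)

-- ===== PRECONDITION & SPEC =====
def Spec_escape_sql_string (value : String) (out : String) : Prop := out = escape_sql_string_alt value
instance (value : String) (out : String) : Decidable (Spec_escape_sql_string value out) := by unfold Spec_escape_sql_string; infer_instance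

-- ===== CLAIM (what is proved, stated in full; the proofs are below) =====
def Claim_equal_escape_sql_string : Prop := ∀ (value : String), Dom_escape_sql_string value → Spec_escape_sql_string value (escape_sql_string value)

-- ===== LEMMAS AND PROOFS =====

-- per-character view of a single-character replace
def subst1 (c : Char) (r : List Char) (x : Char) : List Char :=
  if x = c then r else [x]

theorem replace_go_single (c : Char) (r : List Char) :
    ∀ (l : List Char) (fuel : Nat) (acc : List Char), l.length ≤ fuel →
      PySem.Chars.replace.go [c] r fuel l acc = acc.reverse ++ l.flatMap (subst1 c r) := by
  intro l
  induction l with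
  | nil =>
      intro fuel acc _
      cases fuel <;> simp [PySem.Chars.replace.go]
  | cons x t ih =>
      intro fuel acc h
      cases fuel with
      | zero => simp at h
      | succ n =>
          simp only [PySem.Chars.replace.go]
          by_cases hx : x = c
          · subst hx
            have hpre : List.isPrefixOf [x] (x :: t) = true := by
              simp [List.isPrefixOf]
            rw [if_pos hpre]
            simp only [List.length_cons] at h
            rw [show List.drop (List.length [x]) (x :: t) = t by simp]
            rw [ih n (r.reverse ++ acc) (by omega)]
            simp [subst1]
          · have hpre : List.isPrefixOf [c] (x :: t) = false := by
              simp [List.isPrefixOf, Ne.symm hx]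
            rw [if_neg (by simp [hpre])]
            simp only [List.length_cons] at h
            rw [ih n (x :: acc) (by omega)]
            simp [subst1, hx]

theorem replace_single (s : List Char) (c : Char) (r : List Char) :
    PySem.Chars.replace s [c] r = s.flatMap (subst1 c r) := by
  rw [PySem.Chars.replace]
  rw [if_neg (by simp)]
  simpa using replace_go_single c r s s.length [] le_rfl

-- ===== VERDICT (by name: the statement is the Claim_ definition above) =====
theorem escape_sql_string_spec : Claim_equal_escape_sql_string := by
  intro value _
  unfold Spec_escape_sql_string escape_sql_string escape_sql_string_alt
  rw [← String.toList_inj]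
  simp only [PySem.Str.toList_replace, String.toList_ofList]
  rw [show ("'" : String).toList = ['\''] from rfl, show ("''" : String).toList = ['\'', '\''] from rfl,
      show ("\\" : String).toList = ['\\'] from rfl, show ("\\\\" : String).toList = ['\\', '\\'] from rfl,
      show ("\n" : String).toList = ['\n'] from rfl, show ("\\n" : String).toList = ['\\', 'n'] from rfl,
      show ("\r" : String).toList = ['\r'] from rfl, show ("\\r" : String).toList = ['\\', 'r'] from rfl,
      show ("\t" : String).toList = ['\t'] from rfl, show ("\\t" : String).toList = ['\\', 't'] from rfl,
      show ("\x08" : String).toList = ['\x08'] from rfl, show ("\\b" : String).toList = ['\\', 'b'] from rfl,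
      show ("\x0c" : String).toList = ['\x0c'] from rfl, show ("\\f" : String).toList = ['\\', 'f'] from rfl,
      show ("\"" : String).toList = ['"'] from rfl, show ("\"\"" : String).toList = ['"', '"'] from rfl,
      show ("%" : String).toList = ['%'] from rfl, show ("\\%" : String).toList = ['\\', '%'] from rfl,
      show ("_" : String).toList = ['_'] from rfl, show ("\\_" : String).toList = ['\\', '_'] from rfl]
  simp only [replace_single, List.flatMap_assoc]
  refine List.flatMap_congr (fun x _ => ?_)
  by_cases h1 : x = '\'' ; · subst h1; decide
  by_cases h2 : x = '\\' ; · subst h2; decide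
  by_cases h3 : x = '\n' ; · subst h3; decide
  by_cases h4 : x = '\r' ; · subst h4; decide
  by_cases h5 : x = '\t' ; · subst h5; decide
  by_cases h6 : x = '\x08' ; · subst h6; decide
  by_cases h7 : x = '\x0c' ; · subst h7; decide
  by_cases h8 : x = '"' ; · subst h8; decide
  by_cases h9 : x = '%' ; · subst h9; decide
  by_cases h10 : x = '_' ; · subst h10; decide
  simp [subst1, sqlEscapeTable, h1, h2, h3, h4, h5, h6, h7, h8, h9, h10]
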